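-- pv_equiv track=rewrite | github.com/Shiv2157k/leet_code | amazon/dynamic_programming/minimum_difficulty_in_job_schedule.py | minimum_difficulty_recursive
-- ===== SOURCE A (Python) =====
-- import functools
-- from typing import List
--
-- def minimum_difficulty_recursive(job_difficulty: List[int], days: int) -> int:
--     """
--     Approach: Top Down
--     Time Complexity: O(N^2 * D)
--     Space Complexity: O(ND)
--     :param job_difficulty:
--     :param days:
--     :return:
--     """
--     # dp(day, i) = from ith job difficulty,
--     # we want to find minimum of sub of maximum
--     # difficulties of each day i.e., each sub array
--
--     # ans = dp(d, 0)
--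
--     # recurrence relation
--     # min(max(jb[j: n - d + 1] + dp(d - 1, j + 1)))
--
--     total_jobs = len(job_difficulty)
--     # base case
--     # less number of jobs than days
--     # Which we can't possibly split those into each day.
--     if len(job_difficulty) < days:
--         return -1
--     # memo = {}
--
--     @functools.lru_cache(None)
--     def dp(day: int, cut: int) -> int:
--         # base case
--         # if (day, cut) in memo:
--         #    return memo[(day, cut)]
--         if day == 1:
--             return max(job_difficulty[cut:])
--         max_so_far = 0
--         ans = float("inf")
--         for job in range(cut, total_jobs - day + 1):
--             max_so_far = max(max_so_far, job_difficulty[job])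
--             ans = min(ans, max_so_far + dp(day - 1, job + 1))
--         # memo[(day, cut)] = ans
--         return ans
--     return dp(days, 0)
-- ===== SOURCE B (Python) =====
-- from typing import List
--
--
-- def minimum_difficulty_recursive(job_difficulty: List[int], days: int) -> int:
--     """Bottom-up tabulation with a rolling array instead of memoized recursion."""
--     n = len(job_difficulty)
--     if n < days:
--         return -1
--     # dp[c] = minimum difficulty to schedule jobs c.. over the current number of days
--     dp = [0] * (n + 1)
--     for c in range(n - 1, -1, -1):          # one day: suffix maximum
--         dp[c] = job_difficulty[c] if c == n - 1 else max(job_difficulty[c], dp[c + 1])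
--     for d in range(2, days + 1):            # add one day at a time
--         ndp = [0] * (n + 1)
--         for c in range(0, n - d + 1):
--             mx = 0
--             best = None
--             for j in range(c, n - d + 1):
--                 mx = max(mx, job_difficulty[j])
--                 v = mx + dp[j + 1]
--                 if best is None or v < best:
--                     best = v
--             ndp[c] = best
--         dp = ndp
--     return dp[0]
-- ===== Notes on version B (the rewrite author's own statement) =====
-- stated objective: alternative
-- what changed: A's memoized top-down recursion (lru_cache over dp(day, cut)) is replaced by a bottom-up iterative tabulation: a suffix-maximum base table for one day, then one rolling array updated per extra day.
import Mathlib
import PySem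

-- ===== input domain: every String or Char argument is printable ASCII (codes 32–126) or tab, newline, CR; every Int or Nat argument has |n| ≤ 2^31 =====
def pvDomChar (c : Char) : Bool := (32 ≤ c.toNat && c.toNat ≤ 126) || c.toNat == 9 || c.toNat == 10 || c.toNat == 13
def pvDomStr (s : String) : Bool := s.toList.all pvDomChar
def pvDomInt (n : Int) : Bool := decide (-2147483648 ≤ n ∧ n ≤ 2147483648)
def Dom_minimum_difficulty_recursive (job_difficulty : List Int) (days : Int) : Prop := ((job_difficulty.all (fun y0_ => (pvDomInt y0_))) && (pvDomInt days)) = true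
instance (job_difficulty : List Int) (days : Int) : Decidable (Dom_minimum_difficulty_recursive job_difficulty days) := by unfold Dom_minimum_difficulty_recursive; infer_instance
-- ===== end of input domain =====

-- B replaces A's memoized top-down recursion by a bottom-up tabulation with a rolling array
-- (objective: alternative decomposition of the same DP); A = B is proved for all days ≥ 1.

-- ===== PORT A =====
-- the inner memoized function dp(day, cut); memoization does not change the value, so it is
-- ported as plain recursion on day (day = 0 is unreachable from any call A makes: Pre_ has 1 ≤ days)
def pvA_dp (jd : List Int) (day : Nat) (cut : Int) : Int :=
  match day with
  | 0 => 0  -- unreachable (Python recursion stops at day == 1; day ≤ 0 raises, excluded by Pre_)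
  | 1 => (PySem.List.max? (PySem.List.slice jd (some cut) none) (fun y => y)).getD 0  -- max(job_difficulty[cut:])
  | (d + 2) =>
      let total_jobs : Int := jd.length
      -- for job in range(cut, total_jobs - day + 1): state = (max_so_far, ans); ans = none is float('inf')
      ((PySem.List.pyRange cut (total_jobs - (d + 2) + 1) 1).foldl
        (fun (s : Int × Option Int) job =>
          let ms := max s.1 (PySem.List.pyGetD jd job 0)
          let v := ms + pvA_dp jd (d + 1) (job + 1)
          (ms, some (match s.2 with | none => v | some a => min a v)))
        (0, none)).2.getD 0

def minimum_difficulty_recursive (job_difficulty : List Int) (days : Int) : Int :=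
  if (job_difficulty.length : Int) < days then -1
  else pvA_dp job_difficulty days.toNat 0

-- ===== PORT B =====
-- one assignment dp[c] = ... of the backwards base loop of Source B
def pvB_baseStep (jd : List Int) (dp : List Int) (c : Int) : List Int :=
  let n : Int := jd.length
  dp.set c.toNat
    (if c = n - 1 then PySem.List.pyGetD jd c 0
     else max (PySem.List.pyGetD jd c 0) (PySem.List.pyGetD dp (c + 1) 0))

-- dp[c] = suffix maximum (the one-day table), built by the backwards loop of Source B
def pvB_base (jd : List Int) : List Int :=
  let n : Int := jd.length
  (PySem.List.pyRange (n - 1) (-1) (-1)).foldl (pvB_baseStep jd) (List.replicate (jd.length + 1) 0)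

-- the innermost loop of Source B: mx/best over j in range(c, hi)
def pvB_inner (jd dp : List Int) (c hi : Int) : Option Int :=
  ((PySem.List.pyRange c hi 1).foldl
    (fun (s : Int × Option Int) j =>
      let mx := max s.1 (PySem.List.pyGetD jd j 0)
      let v := mx + PySem.List.pyGetD dp (j + 1) 0
      (mx, some (match s.2 with | none => v | some b => if v < b then v else b)))
    (0, none)).2

-- one day-step: build ndp from dp
def pvB_day (jd dp : List Int) (d : Int) : List Int :=
  let n : Int := jd.length
  (PySem.List.pyRange 0 (n - d + 1) 1).foldl
    (fun ndp c => ndp.set c.toNat ((pvB_inner jd dp c (n - d + 1)).getD 0))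
    (List.replicate (jd.length + 1) 0)

def minimum_difficulty_recursive_alt (job_difficulty : List Int) (days : Int) : Int :=
  let n : Int := job_difficulty.length
  if n < days then -1
  else
    let dp0 := pvB_base job_difficulty
    let dpF := (PySem.List.pyRange 2 (days + 1) 1).foldl
      (fun dp d => pvB_day job_difficulty dp d) dp0
    PySem.List.pyGetD dpF 0 0

-- ===== PRECONDITION & SPEC =====
-- Pre_ excludes exactly days ≤ 0, where the Python A raises IndexError (dp recurses past day 1
-- and indexes job_difficulty out of range); A returns normally on every input with days ≥ 1.
def Pre_minimum_difficulty_recursive (_job_difficulty : List Int) (days : Int) : Prop := 1 ≤ days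
instance (job_difficulty : List Int) (days : Int) : Decidable (Pre_minimum_difficulty_recursive job_difficulty days) := by unfold Pre_minimum_difficulty_recursive; infer_instance

def pvWitness_minimum_difficulty_recursive : List Int × Int := ([6, 5, 4, 3, 2, 1], 2)

def Spec_minimum_difficulty_recursive (job_difficulty : List Int) (days : Int) (out : Int) : Prop := out = minimum_difficulty_recursive_alt job_difficulty days
instance (job_difficulty : List Int) (days : Int) (out : Int) : Decidable (Spec_minimum_difficulty_recursive job_difficulty days out) := by unfold Spec_minimum_difficulty_recursive; infer_instance

-- ===== CLAIM (what is proved, stated in full; the proofs are below) =====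
def Claim_equal_minimum_difficulty_recursive : Prop := ∀ (job_difficulty : List Int) (days : Int), Dom_minimum_difficulty_recursive job_difficulty days → Pre_minimum_difficulty_recursive job_difficulty days → Spec_minimum_difficulty_recursive job_difficulty days (minimum_difficulty_recursive job_difficulty days)

-- ===== LEMMAS AND PROOFS =====

-- foldl max pulls an outer max out
theorem pv_foldl_max (t : List Int) : ∀ (a x : Int), t.foldl max (max a x) = max a (t.foldl max x) := by
  induction t with
  | nil => intro a x; rfl
  | cons y t ih =>
      intro a x
      simp only [List.foldl_cons]
      rw [max_assoc, ih]

-- recurrence of the one-day value (suffix maximum)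
theorem pvA_dp_one (jd : List Int) (c : Nat) (h : c < jd.length) :
    pvA_dp jd 1 (c : Int) =
      if c + 1 = jd.length then jd[c] else max jd[c] (pvA_dp jd 1 ((c : Int) + 1)) := by
  have hc1 : ((c : Int) + 1) = ((c + 1 : Nat) : Int) := by push_cast; ring
  simp only [pvA_dp, PySem.List.slice_from_natCast, hc1]
  rw [List.drop_eq_getElem_cons h]
  rw [PySem.List.max?_id_cons]
  by_cases he : c + 1 = jd.length
  · simp [he]
  · have h2 : c + 1 < jd.length := by omega
    rw [List.drop_eq_getElem_cons h2]
    rw [PySem.List.max?_id_cons]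
    simp only [List.foldl_cons, Option.getD_some, if_neg he]
    rw [pv_foldl_max]

-- pvGood jd t d: t is the correct d-day table on the indices the algorithm reads
def pvGood (jd : List Int) (t : List Int) (d : Int) : Prop :=
  t.length = jd.length + 1 ∧
  ∀ c : Nat, (c : Int) ≤ (jd.length : Int) - d → t.getD c 0 = pvA_dp jd d.toNat (c : Int)

-- the backwards base loop fills the suffix-maximum table
theorem pvBase_loop (jd : List Int) : ∀ (k : Nat) (c0 : Int) (t : List Int),
    c0 < (jd.length : Int) → (c0 + 1).toNat = k → t.length = jd.length + 1 →
    (∀ i : Nat, c0 < (i : Int) → i < jd.length → t.getD i 0 = pvA_dp jd 1 (i : Int)) →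
    ((PySem.List.pyRange c0 (-1) (-1)).foldl (pvB_baseStep jd) t).length = jd.length + 1 ∧
    ∀ i : Nat, i < jd.length →
      ((PySem.List.pyRange c0 (-1) (-1)).foldl (pvB_baseStep jd) t).getD i 0 = pvA_dp jd 1 (i : Int) := by
  intro k
  induction k with
  | zero =>
      intro c0 t hc0 hk hlen ht
      rw [PySem.List.pyRange_neg_one_eq_nil (by omega)]
      exact ⟨hlen, fun i hi => ht i (by omega) hi⟩
  | succ k ih =>
      intro c0 t hc0 hk hlen ht
      have hc0nn : 0 ≤ c0 := by omega
      rw [PySem.List.pyRange_neg_one_cons (by omega : (-1:Int) < c0), List.foldl_cons]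
      apply ih (c0 - 1) (pvB_baseStep jd t c0) (by omega) (by omega)
      · simp [pvB_baseStep, hlen]
      · intro i hi hilen
        by_cases hie : (i : Int) = c0
        · have hmi : c0.toNat = i := by omega
          have hset : (pvB_baseStep jd t c0).getD i 0 =
              (if c0 = (jd.length : Int) - 1 then PySem.List.pyGetD jd c0 0
               else max (PySem.List.pyGetD jd c0 0) (PySem.List.pyGetD t (c0 + 1) 0)) := by
            simp only [pvB_baseStep, hmi]
            rw [List.getD, List.getElem?_set_self (by omega), Option.getD_some]
          rw [hset]
          have hjd : PySem.List.pyGetD jd c0 0 = jd[i] := by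
            rw [← hie, PySem.List.pyGetD_natCast, List.getD_eq_getElem jd 0 hilen]
          rw [pvA_dp_one jd i hilen]
          by_cases hlast : i + 1 = jd.length
          · rw [if_pos (by omega), if_pos hlast, hjd]
          · rw [if_neg (by omega), if_neg hlast, hjd]
            have ht1 : PySem.List.pyGetD t (c0 + 1) 0 = pvA_dp jd 1 ((i : Int) + 1) := by
              have hcast : c0 + 1 = ((i + 1 : Nat) : Int) := by omega
              rw [hcast, PySem.List.pyGetD_natCast]
              rw [ht (i + 1) (by omega) (by omega)]
              push_cast; ring_nf
            rw [ht1]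
        · have : (i : Int) ≠ c0 := hie
          simp only [pvB_baseStep]
          rw [List.getD, List.getElem?_set_ne (by omega), ← List.getD]
          exact ht i (by omega) hilen

theorem pvBase_good (jd : List Int) : pvGood jd (pvB_base jd) 1 := by
  obtain ⟨hlen, hval⟩ := pvBase_loop jd jd.length ((jd.length : Int) - 1)
      (List.replicate (jd.length + 1) 0) (by omega) (by omega) (by simp)
      (fun i hi hilen => absurd hi (by omega))
  refine ⟨hlen, ?_⟩
  intro c hc
  have hclen : c < jd.length := by omega
  exact hval c hclen

-- a fold of index-wise sets whose values ignore the accumulator is a table of g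
theorem pv_set_fold (g : Int → Int) (L : Nat) : ∀ (k : Nat) (m : Int) (t : List Int),
    m.toNat = k → t.length = L →
    ((PySem.List.pyRange 0 m 1).foldl (fun acc c => acc.set c.toNat (g c)) t).length = L ∧
    ∀ i : Nat, i < L →
      ((PySem.List.pyRange 0 m 1).foldl (fun acc c => acc.set c.toNat (g c)) t).getD i 0 =
        if (i : Int) < m then g (i : Int) else t.getD i 0 := by
  intro k
  induction k with
  | zero =>
      intro m t hm hlen
      rw [PySem.List.pyRange_one_eq_nil (by omega)]
      refine ⟨hlen, ?_⟩
      intro i _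
      rw [if_neg (by omega)]
      rfl
  | succ k ih =>
      intro m t hm hlen
      have hm1 : m = (m - 1) + 1 := by ring
      rw [hm1, PySem.List.pyRange_one_succ_right (by omega), List.foldl_append]
      obtain ⟨ihlen, ihval⟩ := ih (m - 1) t (by omega) hlen
      simp only [List.foldl_cons, List.foldl_nil]
      constructor
      · simpa using ihlen
      · intro i hi
        by_cases hie : (i : Int) = m - 1
        · have hmi : (m - 1).toNat = i := by omega
          rw [if_pos (by omega), hmi, List.getD, List.getElem?_set_self (by omega), Option.getD_some, hie]
        · rw [List.getD, List.getElem?_set_ne (by omega), ← List.getD]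
          rw [ihval i hi]
          by_cases hlt : (i : Int) < m - 1
          · rw [if_pos hlt, if_pos (by omega)]
          · rw [if_neg hlt, if_neg (by omega)]

-- the inner loop of Source B computes A's recursive value, given a correct (d-1)-day table
theorem pvInner_eq (jd t : List Int) (d c : Int) (hc : 0 ≤ c) (hd : 2 ≤ d)
    (ht : ∀ i : Nat, (i : Int) ≤ (jd.length : Int) - (d - 1) → t.getD i 0 = pvA_dp jd (d - 1).toNat (i : Int)) :
    (pvB_inner jd t c ((jd.length : Int) - d + 1)).getD 0 = pvA_dp jd d.toNat c := by
  have hk : d.toNat = (d.toNat - 2) + 2 := by omega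
  rw [hk]
  have hcast : (((d.toNat - 2) : Nat) : Int) + 2 = d := by omega
  simp only [pvA_dp, pvB_inner]
  have hrange : (jd.length : Int) - ((((d.toNat - 2) : Nat) : Int) + 2) + 1 = (jd.length : Int) - d + 1 := by
    omega
  rw [hrange]
  have hfold : ∀ (s : Int × Option Int) (j : Int), j ∈ PySem.List.pyRange c ((jd.length : Int) - d + 1) 1 →
      (fun (s : Int × Option Int) j =>
        let mx := max s.1 (PySem.List.pyGetD jd j 0)
        let v := mx + PySem.List.pyGetD t (j + 1) 0
        (mx, some (match s.2 with | none => v | some b => if v < b then v else b))) s j =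
      (fun (s : Int × Option Int) job =>
        let ms := max s.1 (PySem.List.pyGetD jd job 0)
        let v := ms + pvA_dp jd ((d.toNat - 2) + 1) (job + 1)
        (ms, some (match s.2 with | none => v | some a => min a v))) s j := by
    intro s j hj
    rw [PySem.List.mem_pyRange_one] at hj
    simp only
    have hv : PySem.List.pyGetD t (j + 1) 0 = pvA_dp jd ((d.toNat - 2) + 1) (j + 1) := by
      have hj1 : j + 1 = (((j + 1).toNat : Nat) : Int) := by omega
      rw [hj1, PySem.List.pyGetD_natCast]
      rw [ht (j + 1).toNat (by omega)]
      have : (d - 1).toNat = (d.toNat - 2) + 1 := by omega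
      rw [this]
    rw [hv]
    refine Prod.ext rfl ?_
    simp only
    cases s.2 with
    | none => rfl
    | some a =>
        simp only [Option.some.injEq]
        set v := max s.1 (PySem.List.pyGetD jd j 0) + pvA_dp jd ((d.toNat - 2) + 1) (j + 1) with hvdef
        by_cases hlt : v < a
        · rw [if_pos hlt, min_eq_right hlt.le]
        · rw [if_neg hlt, min_eq_left (not_lt.mp hlt)]
  have heq := PySem.List.foldl_congr_mem _ _ _ ((0 : Int), (none : Option Int)) hfold
  exact congrArg (fun p : Int × Option Int => p.2.getD 0) heq

-- one day-step preserves correctness of the table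
theorem pvDay_good (jd t : List Int) (d : Int) (hd : 2 ≤ d)
    (ht : pvGood jd t (d - 1)) : pvGood jd (pvB_day jd t d) d := by
  obtain ⟨hlen, hval⟩ := ht
  obtain ⟨flen, fval⟩ := pv_set_fold
      (fun c => (pvB_inner jd t c ((jd.length : Int) - d + 1)).getD 0) (jd.length + 1)
      ((jd.length : Int) - d + 1).toNat ((jd.length : Int) - d + 1)
      (List.replicate (jd.length + 1) 0) rfl (by simp)
  refine ⟨flen, ?_⟩
  intro c hc
  have hcL : c < jd.length + 1 := by omega
  rw [show pvB_day jd t d = (PySem.List.pyRange 0 ((jd.length : Int) - d + 1) 1).foldl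
        (fun ndp cc => ndp.set cc.toNat ((pvB_inner jd t cc ((jd.length : Int) - d + 1)).getD 0))
        (List.replicate (jd.length + 1) 0) from rfl]
  rw [fval c hcL, if_pos (by omega)]
  exact pvInner_eq jd t d (c : Int) (by omega) hd hval

-- the outer loop over days yields the days-day table
theorem pvDays_loop (jd : List Int) : ∀ (k : Nat) (e : Int), 1 ≤ e → e ≤ (jd.length : Int) →
    (e - 1).toNat = k →
    pvGood jd ((PySem.List.pyRange 2 (e + 1) 1).foldl (fun dp d => pvB_day jd dp d) (pvB_base jd)) e := by
  intro k
  induction k with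
  | zero =>
      intro e he1 _ hk
      have he : e = 1 := by omega
      subst he
      rw [PySem.List.pyRange_one_eq_nil (by omega), List.foldl_nil]
      exact pvBase_good jd
  | succ k ih =>
      intro e he1 hen hk
      have he2 : 2 ≤ e := by omega
      rw [show e + 1 = e + 1 from rfl, PySem.List.pyRange_one_succ_right (by omega : (2:Int) ≤ e),
        List.foldl_append, List.foldl_cons, List.foldl_nil]
      have ihg : pvGood jd ((PySem.List.pyRange 2 e 1).foldl (fun dp d => pvB_day jd dp d) (pvB_base jd)) (e - 1) := by
        have : e = (e - 1) + 1 := by ring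
        rw [show (PySem.List.pyRange 2 e 1) = (PySem.List.pyRange 2 ((e - 1) + 1) 1) by rw [← this]]
        exact ih (e - 1) (by omega) (by omega) (by omega)
      exact pvDay_good jd _ e he2 ihg

theorem pv_main : ∀ (jd : List Int) (days : Int), 1 ≤ days →
    minimum_difficulty_recursive jd days = minimum_difficulty_recursive_alt jd days := by
  intro jd days hdays
  unfold minimum_difficulty_recursive minimum_difficulty_recursive_alt
  by_cases hlt : (jd.length : Int) < days
  · simp [hlt]
  · simp only [hlt]
    obtain ⟨hlen, hval⟩ := pvDays_loop jd (days - 1).toNat days hdays (by omega) rfl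
    have h0 := hval 0 (by push_cast; omega)
    simp only [Int.ofNat_zero] at h0 ⊢
    rw [PySem.List.pyGetD_zero, h0]

-- ===== VERDICT (by name: the statement is the Claim_ definition above) =====
theorem minimum_difficulty_recursive_spec : Claim_equal_minimum_difficulty_recursive := by
  intro jd days _ hpre
  unfold Spec_minimum_difficulty_recursive
  exact pv_main jd days hpre
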